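-- pv_equiv track=rewrite | github.com/simonpainter/AdventOfCode | 2015/17/day17.py | find_combinations
-- ===== SOURCE A (Python) =====
-- def find_combinations(containers, target, current_combo=None, start_index=0):
--     if current_combo is None:
--         current_combo = []
--
--     # Base cases
--     current_sum = sum(current_combo)
--     if current_sum == target:
--         return [current_combo[:]]  # Found a valid combination
--     if current_sum > target or start_index >= len(containers):
--         return []  # Invalid combination
--
--     combinations = []
--
--     # Try including the current container
--     current_combo.append(containers[start_index])
--     combinations.extend(find_combinations(containers, target, current_combo, start_index + 1))
--     current_combo.pop()
--
--     # Try without the current container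
--     combinations.extend(find_combinations(containers, target, current_combo, start_index + 1))
--
--     return combinations
-- ===== SOURCE B (Python) =====
-- def find_combinations(containers, target, current_combo=None, start_index=0):
--     base = list(current_combo) if current_combo is not None else []
--     n = len(containers)
--     results = []
--     stack = [(start_index, base, sum(base))]
--     while stack:
--         i, combo, s = stack.pop()
--         if s == target:
--             results.append(combo)
--             continue
--         if s > target or i >= n:
--             continue
--         x = containers[i]
--         stack.append((i + 1, combo, s))            # exclude branch (popped second)
--         stack.append((i + 1, combo + [x], s + x))  # include branch (popped first)
--     return results
-- ===== Notes on version B (the rewrite author's own statement) =====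
-- stated objective: alternative
-- what changed: Replaced the backtracking recursion (which mutates a shared combo list and re-sums it at every call) by an iterative DFS over an explicit stack of (index, combo, running-sum) frames, pushing exclude-before-include so pops reproduce A's exact output order; the running sum is carried in the frame instead of recomputed.
import Mathlib
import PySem

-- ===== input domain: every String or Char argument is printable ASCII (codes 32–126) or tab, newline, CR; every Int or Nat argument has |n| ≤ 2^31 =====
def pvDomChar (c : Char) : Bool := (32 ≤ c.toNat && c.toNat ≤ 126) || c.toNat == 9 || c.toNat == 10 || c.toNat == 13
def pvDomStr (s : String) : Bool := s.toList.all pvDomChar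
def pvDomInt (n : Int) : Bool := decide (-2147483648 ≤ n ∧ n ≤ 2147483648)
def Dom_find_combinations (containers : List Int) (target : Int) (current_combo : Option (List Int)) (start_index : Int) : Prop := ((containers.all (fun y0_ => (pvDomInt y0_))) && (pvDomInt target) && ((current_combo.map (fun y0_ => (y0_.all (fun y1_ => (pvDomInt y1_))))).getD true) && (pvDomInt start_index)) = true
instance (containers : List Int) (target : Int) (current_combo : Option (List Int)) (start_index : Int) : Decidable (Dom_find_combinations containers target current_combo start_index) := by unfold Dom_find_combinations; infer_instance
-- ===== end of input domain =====

-- B replaces A's mutating backtracking recursion by an iterative DFS over an explicit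
-- stack of (index, combo, running-sum) frames, same cost, same output order.
-- A mutates current_combo in place (append/pop, net effect none); only the return value is claimed.

-- ===== PORT A =====
def find_combinations (containers : List Int) (target : Int) (current_combo : Option (List Int)) (start_index : Int) : List (List Int) :=
  let cc := current_combo.getD []
  if cc.sum = target then [cc]
  else if cc.sum > target ∨ (containers.length : Int) ≤ start_index then []
  else
    match PySem.List.pyGet? containers start_index with
    | none => []  -- Python raises IndexError here; such inputs are outside Pre_
    | some x =>
      find_combinations containers target (some (cc ++ [x])) (start_index + 1) ++
      find_combinations containers target (some cc) (start_index + 1)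
termination_by ((containers.length : Int) - start_index).toNat
decreasing_by all_goals omega

-- ===== PORT B =====
-- the while-stack loop of Source B; frames are (start_index, combo, running sum)
def fcLoop (containers : List Int) (target : Int) (stack : List (Int × List Int × Int)) (results : List (List Int)) : List (List Int) :=
  match stack with
  | [] => results
  | (i, combo, s) :: rest =>
    if s = target then fcLoop containers target rest (results ++ [combo])
    else if s > target ∨ (containers.length : Int) ≤ i then fcLoop containers target rest results
    else
      match PySem.List.pyGet? containers i with
      | none => fcLoop containers target rest results  -- Python raises IndexError here; outside Pre_
      | some x =>
        fcLoop containers target ((i + 1, combo ++ [x], s + x) :: (i + 1, combo, s) :: rest) results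
termination_by (stack.map (fun f => 3 ^ (((containers.length : Int) - f.1).toNat + 1))).sum
decreasing_by
  · have h3 : 0 < 3 ^ (((containers.length : Int) - i).toNat + 1) := pow_pos (by norm_num) _
    simp only [List.map_cons, List.sum_cons]; omega
  · have h3 : 0 < 3 ^ (((containers.length : Int) - i).toNat + 1) := pow_pos (by norm_num) _
    simp only [List.map_cons, List.sum_cons]; omega
  · have h3 : 0 < 3 ^ (((containers.length : Int) - i).toNat + 1) := pow_pos (by norm_num) _
    simp only [List.map_cons, List.sum_cons]; omega
  · simp only [List.map_cons, List.sum_cons]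
    have hb : (((containers.length : Int) - i).toNat) = (((containers.length : Int) - (i + 1)).toNat) + 1 := by omega
    rw [hb, pow_succ]
    have h3 : 0 < 3 ^ ((((containers.length : Int) - (i + 1)).toNat) + 1) := pow_pos (by norm_num) _
    omega

def find_combinations_alt (containers : List Int) (target : Int) (current_combo : Option (List Int)) (start_index : Int) : List (List Int) :=
  let base := current_combo.getD []
  fcLoop containers target [(start_index, base, base.sum)] []

-- ===== PRECONDITION & SPEC =====
-- Pre_ excludes exactly the inputs on which the Python A (and the Python B alike) raises
-- IndexError: a start_index below -len(containers) reached while the running sum is still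
-- strictly below target, so containers[start_index] is evaluated out of range.
def Pre_find_combinations (containers : List Int) (target : Int) (current_combo : Option (List Int)) (start_index : Int) : Prop :=
  -(containers.length : Int) ≤ start_index ∨ target ≤ (current_combo.getD []).sum
instance (containers : List Int) (target : Int) (current_combo : Option (List Int)) (start_index : Int) : Decidable (Pre_find_combinations containers target current_combo start_index) := by unfold Pre_find_combinations; infer_instance
def pvWitness_find_combinations : List Int × Int × Option (List Int) × Int := ([1, 2, 3], 3, none, 0)

def Spec_find_combinations (containers : List Int) (target : Int) (current_combo : Option (List Int)) (start_index : Int) (out : List (List Int)) : Prop := out = find_combinations_alt containers target current_combo start_index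
instance (containers : List Int) (target : Int) (current_combo : Option (List Int)) (start_index : Int) (out : List (List Int)) : Decidable (Spec_find_combinations containers target current_combo start_index out) := by unfold Spec_find_combinations; infer_instance

-- ===== CLAIM (what is proved, stated in full; the proofs are below) =====
def Claim_equal_find_combinations : Prop := ∀ (containers : List Int) (target : Int) (current_combo : Option (List Int)) (start_index : Int), Dom_find_combinations containers target current_combo start_index → Pre_find_combinations containers target current_combo start_index → Spec_find_combinations containers target current_combo start_index (find_combinations containers target current_combo start_index)

-- ===== LEMMAS AND PROOFS =====

-- One-step unfoldings of A's recursion (with the option already normalised to `some`).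
lemma fc_eq_target (containers : List Int) (target : Int) (combo : List Int) (i : Int)
    (h : combo.sum = target) :
    find_combinations containers target (some combo) i = [combo] := by
  rw [find_combinations.eq_def]; simp [h]

lemma fc_done (containers : List Int) (target : Int) (combo : List Int) (i : Int)
    (h1 : ¬ combo.sum = target) (h2 : combo.sum > target ∨ (containers.length : Int) ≤ i) :
    find_combinations containers target (some combo) i = [] := by
  rw [find_combinations.eq_def]; simp [h1, h2]

lemma fc_none (containers : List Int) (target : Int) (combo : List Int) (i : Int)
    (h1 : ¬ combo.sum = target) (h2 : ¬ (combo.sum > target ∨ (containers.length : Int) ≤ i))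
    (heq : PySem.List.pyGet? containers i = none) :
    find_combinations containers target (some combo) i = [] := by
  rw [find_combinations.eq_def]; simp [h1, h2, heq]

lemma fc_step (containers : List Int) (target : Int) (combo : List Int) (i x : Int)
    (h1 : ¬ combo.sum = target) (h2 : ¬ (combo.sum > target ∨ (containers.length : Int) ≤ i))
    (heq : PySem.List.pyGet? containers i = some x) :
    find_combinations containers target (some combo) i =
      find_combinations containers target (some (combo ++ [x])) (i + 1) ++
      find_combinations containers target (some combo) (i + 1) := by
  rw [find_combinations.eq_def]; simp [h1, h2, heq]

-- A only looks at current_combo.getD [], so we may normalise the option to `some`.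
lemma fc_some (containers : List Int) (target : Int) (co : Option (List Int)) (i : Int) :
    find_combinations containers target co i =
    find_combinations containers target (some (co.getD [])) i := by
  rw [find_combinations.eq_def, find_combinations.eq_def]
  simp

-- Loop invariant: running the stack loop appends, in order, A's result for each frame
-- whose stored sum matches its combo's sum.
lemma fcLoop_spec (containers : List Int) (target : Int) :
    ∀ (stack : List (Int × List Int × Int)) (results : List (List Int)),
    (∀ f ∈ stack, f.2.2 = f.2.1.sum) →
    fcLoop containers target stack results =
      results ++ (stack.map (fun f => find_combinations containers target (some f.2.1) f.1)).flatten := by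
  intro stack results hinv
  induction stack, results using fcLoop.induct containers target with
  | case1 results => simp [fcLoop]
  | case2 results i combo rest ih =>
    have hs : target = combo.sum := hinv (i, combo, target) (by simp)
    rw [fcLoop, if_pos rfl, ih (fun f hf => hinv f (by simp [hf]))]
    simp [List.map_cons, List.flatten_cons, fc_eq_target containers target combo i hs.symm]
  | case3 results i combo s rest hne hge ih =>
    have hs : s = combo.sum := hinv (i, combo, s) (by simp)
    rw [fcLoop, if_neg hne, if_pos hge, ih (fun f hf => hinv f (by simp [hf]))]
    rw [hs] at hne hge
    simp [List.map_cons, List.flatten_cons, fc_done containers target combo i hne hge]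
  | case4 results i combo s rest hne hge heq ih =>
    have hs : s = combo.sum := hinv (i, combo, s) (by simp)
    rw [fcLoop, if_neg hne, if_neg hge, heq, ih (fun f hf => hinv f (by simp [hf]))]
    rw [hs] at hne hge
    simp [List.map_cons, List.flatten_cons, fc_none containers target combo i hne hge heq]
  | case5 results i combo s rest hne hge x heq ih =>
    have hs : s = combo.sum := hinv (i, combo, s) (by simp)
    rw [fcLoop, if_neg hne, if_neg hge, heq]
    change fcLoop containers target ((i + 1, combo ++ [x], s + x) :: (i + 1, combo, s) :: rest) results = _
    rw [ih (by
      intro f hf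
      simp only [List.mem_cons] at hf
      rcases hf with hf | hf | hf
      · subst hf; simp [List.sum_append, ← hs]
      · subst hf; simp [← hs]
      · exact hinv f (by simp [hf]))]
    rw [hs] at hne hge
    simp [List.map_cons, List.flatten_cons, fc_step containers target combo i x hne hge heq]

-- ===== VERDICT (by name: the statement is the Claim_ definition above) =====
theorem find_combinations_spec : Claim_equal_find_combinations := by
  intro containers target current_combo start_index _ _
  unfold Spec_find_combinations find_combinations_alt
  rw [fcLoop_spec containers target _ _ (by simp)]
  simp [fc_some containers target current_combo start_index]
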